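-- pv_equiv track=rewrite | github.com/uarjunan997-del/email-marketing-backend | python-ai/extraction_lambda.py | strip_footer
-- ===== SOURCE A (Python) =====
-- LEGEND_TRIGGER_KEYWORDS=["legends","legend:","end of statement"]
--
-- def strip_footer(text:str)->str:
--     if not text: return text
--     out=[]; stop=False
--     for line in text.splitlines():
--         l=line.lower()
--         if any(k in l for k in LEGEND_TRIGGER_KEYWORDS): stop=True
--         if stop: continue
--         out.append(line)
--     return "\n".join(out)
-- ===== SOURCE B (Python) =====
-- LEGEND_TRIGGER_KEYWORDS=["legends","legend:","end of statement"]
--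
-- def strip_footer(text: str) -> str:
--     if not text:
--         return text
--     kept = []
--     for line in reversed(text.splitlines()):
--         if any(k in line.lower() for k in LEGEND_TRIGGER_KEYWORDS):
--             kept = []          # a trigger line discards everything after it
--         else:
--             kept.append(line)
--     kept.reverse()
--     return "\n".join(kept)
-- ===== Notes on version B (the rewrite author's own statement) =====
-- stated objective: alternative
-- what changed: Traverses the lines back-to-front with a reset-on-trigger accumulator: a trigger line empties the collected suffix, so the surviving (reversed) accumulator is exactly the prefix before the first trigger; no stop flag, no index search, no slice.
import Mathlib
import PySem

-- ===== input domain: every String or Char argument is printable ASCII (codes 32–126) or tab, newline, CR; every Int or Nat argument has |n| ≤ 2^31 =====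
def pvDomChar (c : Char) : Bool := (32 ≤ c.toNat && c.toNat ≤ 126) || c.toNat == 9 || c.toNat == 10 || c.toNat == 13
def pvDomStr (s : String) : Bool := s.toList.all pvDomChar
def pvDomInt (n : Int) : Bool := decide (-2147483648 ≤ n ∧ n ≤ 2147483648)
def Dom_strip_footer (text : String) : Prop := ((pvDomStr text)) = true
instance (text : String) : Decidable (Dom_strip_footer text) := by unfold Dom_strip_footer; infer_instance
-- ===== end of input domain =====

-- B replaces A's forward sticky-stop-flag loop by a back-to-front traversal with a
-- reset-on-trigger accumulator (objective: alternative, same cost).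

def pvKeywords : List String := ["legends", "legend:", "end of statement"]

-- ===== PORT A =====
-- loop body of A's for-loop over the state (out, stop)
def pvStepA (st : List String × Bool) (line : String) : List String × Bool :=
  let l := PySem.Str.lower line
  let stop := if pvKeywords.any (fun k => PySem.Str.isIn k l) then true else st.2
  if stop then (st.1, stop) else (st.1 ++ [line], stop)

def strip_footer (text : String) : String :=
  if text = "" then text
  else
    let r := (PySem.Str.splitlines text).foldl pvStepA ([], false)
    PySem.Str.join "\n" r.1

-- ===== PORT B =====
def pvIsTrigger (line : String) : Bool :=
  pvKeywords.any (fun k => PySem.Str.isIn k (PySem.Str.lower line))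

-- loop body of B's for-loop over reversed(lines): reset on trigger, else append
def pvStepB (kept : List String) (line : String) : List String :=
  if pvIsTrigger line then [] else kept ++ [line]

def strip_footer_alt (text : String) : String :=
  if text = "" then text
  else
    let kept := (PySem.Str.splitlines text).reverse.foldl pvStepB []
    PySem.Str.join "\n" kept.reverse

-- ===== PRECONDITION & SPEC =====
def Spec_strip_footer (text : String) (out : String) : Prop := out = strip_footer_alt text
instance (text : String) (out : String) : Decidable (Spec_strip_footer text out) := by unfold Spec_strip_footer; infer_instance

-- ===== CLAIM =====
def Claim_equal_strip_footer : Prop := ∀ (text : String), Dom_strip_footer text → Spec_strip_footer text (strip_footer text)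

-- ===== LEMMAS AND PROOFS =====

theorem stepA_stopped (acc : List String) (line : String) :
    pvStepA (acc, true) line = (acc, true) := by
  unfold pvStepA; simp

theorem stepA_trig (acc : List String) (line : String) (h : pvIsTrigger line = true) :
    pvStepA (acc, false) line = (acc, true) := by
  unfold pvStepA
  unfold pvIsTrigger at h
  simp at h
  simp [h]

theorem stepA_notrig (acc : List String) (line : String) (h : pvIsTrigger line = false) :
    pvStepA (acc, false) line = (acc ++ [line], false) := by
  unfold pvStepA
  unfold pvIsTrigger at h
  simp at h
  have hno : ¬ ∃ x ∈ pvKeywords, PySem.Chars.isIn x.toList (PySem.Chars.lower line.toList) = true := by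
    rintro ⟨x, hx, hp⟩
    simp [h x hx] at hp
  simp [hno]

theorem foldl_stop_true (lines : List String) (acc : List String) :
    lines.foldl pvStepA (acc, true) = (acc, true) := by
  induction lines with
  | nil => rfl
  | cons l ls ih => rw [List.foldl_cons, stepA_stopped, ih]

-- B's reversed fold is a foldr of the flipped step
theorem foldB_eq_foldr (lines : List String) :
    lines.reverse.foldl pvStepB [] = lines.foldr (fun line acc => pvStepB acc line) [] := by
  rw [List.foldl_reverse]

-- the reversed accumulator of B is the prefix of the lines before the first trigger
theorem foldr_b_reverse (lines : List String) :
    (lines.foldr (fun line acc => pvStepB acc line) []).reverse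
      = lines.take (lines.findIdx pvIsTrigger) := by
  induction lines with
  | nil => simp
  | cons l ls ih =>
    by_cases h : pvIsTrigger l
    · simp [pvStepB, h, List.findIdx_cons]
    · simp only [pvStepB] at ih
      simp [pvStepB, h, List.findIdx_cons, ih]

-- A's accumulated output is the same prefix
theorem foldl_a_eq_take (lines : List String) (acc : List String) :
    (lines.foldl pvStepA (acc, false)).1
      = acc ++ lines.take (lines.findIdx pvIsTrigger) := by
  induction lines generalizing acc with
  | nil => simp
  | cons l ls ih =>
    by_cases h : pvIsTrigger l
    · rw [List.foldl_cons, stepA_trig _ _ h, foldl_stop_true]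
      simp [List.findIdx_cons, h]
    · rw [List.foldl_cons, stepA_notrig _ _ (by simpa using h), ih]
      simp [List.findIdx_cons, h]

-- ===== VERDICT =====
theorem strip_footer_spec : Claim_equal_strip_footer := by
  intro text _
  unfold Spec_strip_footer strip_footer strip_footer_alt
  by_cases h : text = ""
  · simp [h]
  · simp only [if_neg h]
    rw [foldB_eq_foldr, foldr_b_reverse,
        foldl_a_eq_take (PySem.Str.splitlines text) [], List.nil_append]
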